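-- pv_equiv track=rewrite | github.com/sunkisser/manim | manimlib/utils/iterables.py | remove_list_redundancies
-- ===== SOURCE A (Python) =====
-- from typing import Callable, Iterable, Sequence, TypeVar
--
-- T = TypeVar("T")
--
-- def remove_list_redundancies(l: Iterable[T]) -> list[T]:
--     """
--     Used instead of list(set(l)) to maintain order
--     Keeps the last occurrence of each element
--     """
--     reversed_result = []
--     used = set()
--     for x in reversed(l):
--         if x not in used:
--             reversed_result.append(x)
--             used.add(x)
--     reversed_result.reverse()
--     return reversed_result
-- ===== SOURCE B (Python) =====
-- def remove_list_redundancies(l):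
--     """
--     Used instead of list(set(l)) to maintain order
--     Keeps the last occurrence of each element
--     """
--     last = {}
--     for x in l:
--         if x in last:
--             del last[x]
--         last[x] = None
--     return list(last)
-- ===== Notes on version B (the rewrite author's own statement) =====
-- stated objective: idiomatic
-- what changed: Single forward pass keeping an insertion-ordered dict as an ordered set with move-to-end (delete then re-insert), so the final key order is each element's last occurrence; replaces A's reversed iteration with a seen-set plus a final in-place reverse.
import Mathlib
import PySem

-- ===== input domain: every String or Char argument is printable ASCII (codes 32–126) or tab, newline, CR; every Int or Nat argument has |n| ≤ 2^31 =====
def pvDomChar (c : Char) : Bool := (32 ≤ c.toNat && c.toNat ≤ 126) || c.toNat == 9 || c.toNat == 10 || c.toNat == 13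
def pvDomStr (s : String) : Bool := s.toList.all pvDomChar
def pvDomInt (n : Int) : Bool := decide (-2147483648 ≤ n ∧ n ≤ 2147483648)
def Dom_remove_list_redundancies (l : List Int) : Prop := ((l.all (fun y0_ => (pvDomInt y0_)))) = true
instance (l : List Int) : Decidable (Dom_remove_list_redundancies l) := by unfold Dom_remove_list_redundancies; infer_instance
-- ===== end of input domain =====

-- B replaces A's reversed pass + seen-set + final reverse by one forward pass over an
-- insertion-ordered dict used as a move-to-end ordered set (idiomatic, same cost).

-- ===== PORT A =====
-- for x in reversed(l): if x not in used: reversed_result.append(x); used.add(x); then reverse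
def remove_list_redundancies (l : List Int) : List Int :=
  let st := l.reverse.foldl
    (fun (st : List Int × PySem.Set Int) x =>
      if !(PySem.Set.contains st.2 x) then (st.1 ++ [x], PySem.Set.add st.2 x) else st)
    ([], PySem.Set.empty)
  st.1.reverse

-- ===== PORT B =====
-- for x in l: if x in last: del last[x]; last[x] = None; return list(last)
def remove_list_redundancies_alt (l : List Int) : List Int :=
  (l.foldl
    (fun (last : PySem.Dict Int (Option Int)) x =>
      let last := if last.contains x then last.erase x else last
      last.insert x none)
    PySem.Dict.empty).keys

-- ===== PRECONDITION & SPEC =====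
def Spec_remove_list_redundancies (l : List Int) (out : List Int) : Prop := out = remove_list_redundancies_alt l
instance (l : List Int) (out : List Int) : Decidable (Spec_remove_list_redundancies l out) := by unfold Spec_remove_list_redundancies; infer_instance

-- ===== CLAIM (what is proved, stated in full; the proofs are below) =====
def Claim_equal_remove_list_redundancies : Prop := ∀ (l : List Int), Dom_remove_list_redundancies l → Spec_remove_list_redundancies l (remove_list_redundancies l)

-- ===== LEMMAS AND PROOFS =====

-- A's loop keeps its two accumulators equal, and they evolve exactly like set-insertion.
lemma pvPairLoop (l : List Int) : ∀ (r : PySem.Set Int),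
    l.foldl
      (fun (st : List Int × PySem.Set Int) x =>
        if !(PySem.Set.contains st.2 x) then (st.1 ++ [x], PySem.Set.add st.2 x) else st)
      (r, r)
      = (l.foldl PySem.Set.add r, l.foldl PySem.Set.add r) := by
  induction l with
  | nil => intro r; rfl
  | cons x xs ih =>
    intro r
    simp only [List.foldl_cons]
    by_cases h : PySem.Set.contains r x = true
    · simp only [h, Bool.not_true, Bool.false_eq_true, if_false, PySem.Set.add, if_true]
      exact ih r
    · simp only [Bool.not_eq_true] at h
      simp only [h, Bool.not_false, if_true, PySem.Set.add, Bool.false_eq_true, if_false]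
      exact ih (r ++ [x])

lemma pvA_eq (l : List Int) :
    remove_list_redundancies l = (PySem.Set.ofList l.reverse).reverse := by
  show ((l.reverse.foldl _ (([] : List Int), (PySem.Set.empty : PySem.Set Int))).1).reverse = _
  rw [show (PySem.Set.empty : PySem.Set Int) = ([] : List Int) from rfl]
  rw [pvPairLoop l.reverse []]
  rw [PySem.Set.ofList_eq_foldl]

-- One step of B's loop on the key list: drop x (if present) and append it at the end.
lemma pvKeysStep (d : PySem.Dict Int (Option Int)) (x : Int) :
    ((if d.contains x then d.erase x else d).insert x none).keys
      = d.keys.filter (fun y => !(y == x)) ++ [x] := by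
  by_cases h : d.contains x = true
  · have h2 : (d.erase x).contains x = false := by
      simp [PySem.Dict.contains, PySem.Dict.erase, List.any_filter]
    simp only [h, if_true, PySem.Dict.insert, h2, Bool.false_eq_true, if_false]
    show List.map _ (List.filter _ d.items ++ [(x, (none : Option Int))]) = _
    rw [List.map_append]
    simp only [PySem.Dict.keys]
    rw [List.filter_map]
    rfl
  · have hx : x ∉ d.keys := by
      intro hx
      simp only [PySem.Dict.keys, List.mem_map] at hx
      obtain ⟨p, hp, hpx⟩ := hx
      have hc : d.contains x = true := by
        simp only [PySem.Dict.contains, List.any_eq_true]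
        exact ⟨p, hp, by simp [hpx]⟩
      simp [hc] at h
    have h2 : ∀ y ∈ d.keys, (!(y == x)) = true := by
      intro y hy
      simp only [Bool.not_eq_eq_eq_not, Bool.not_true, beq_eq_false_iff_ne, ne_eq]
      rintro rfl
      exact hx hy
    rw [List.filter_eq_self.mpr h2]
    simp only [h, Bool.false_eq_true, if_false, PySem.Dict.insert, if_false]
    simp [PySem.Dict.keys]

lemma pvB_eq_aux (l : List Int) : ∀ (d : PySem.Dict Int (Option Int)),
    (l.foldl
      (fun (last : PySem.Dict Int (Option Int)) x =>
        let last := if last.contains x then last.erase x else last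
        last.insert x none) d).keys
      = l.foldl (fun ks x => ks.filter (fun y => !(y == x)) ++ [x]) d.keys := by
  induction l with
  | nil => intro d; rfl
  | cons x xs ih =>
    intro d
    simp only [List.foldl_cons]
    rw [ih, pvKeysStep]

lemma pvB_eq (l : List Int) :
    remove_list_redundancies_alt l
      = l.foldl (fun ks x => ks.filter (fun y => !(y == x)) ++ [x]) [] := by
  show (l.foldl _ (PySem.Dict.empty : PySem.Dict Int (Option Int))).keys = _
  rw [pvB_eq_aux]
  rfl

-- keep-last dedup: the reversed keep-first dedup of the reversed list is B's forward fold.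
lemma pvMain (l : List Int) :
    (PySem.Set.ofList l.reverse).reverse
      = l.foldl (fun ks x => ks.filter (fun y => !(y == x)) ++ [x]) [] := by
  induction l using List.reverseRecOn with
  | nil => rfl
  | append_singleton xs x ih =>
    rw [List.foldl_append, List.foldl_cons, List.foldl_nil, ← ih]
    rw [List.reverse_append, List.reverse_cons, List.reverse_nil, List.nil_append,
        List.singleton_append]
    rw [PySem.Set.ofList_cons, List.reverse_cons]
    congr 1
    show (PySem.Set.discard _ x).reverse = _
    simp only [PySem.Set.discard, List.filter_reverse]

-- ===== VERDICT (by name: the statement is the Claim_ definition above) =====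
theorem remove_list_redundancies_spec : Claim_equal_remove_list_redundancies := by
  intro l _
  show remove_list_redundancies l = remove_list_redundancies_alt l
  rw [pvA_eq, pvB_eq, pvMain]
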